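-- pv_equiv track=rewrite | github.com/MrBrantCode/unitest_baseline | mut_generate/mist_train_cf/cf_18677/solution.py | prime_product
-- ===== SOURCE A (Python) =====
-- def prime_product(arr):
--     # Function to check if a number is prime
--     def is_prime(n):
--         if n < 2:
--             return False
--         for i in range(2, int(n ** 0.5) + 1):
--             if n % i == 0:
--                 return False
--         return True
--
--     # List comprehension to get prime numbers in descending order
--     primes = [num for num in sorted(arr, reverse=True) if is_prime(num)]
--
--     # Calculate the product of the first four prime numbers
--     product = 1
--     for num in primes[:4]:
--         product *= num
--
--     return product
-- ===== SOURCE B (Python) =====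
-- def prime_product(arr):
--     # Primality by odd-only trial division (no float sqrt): reject evens except 2,
--     # then try odd divisors d = 3, 5, ... while d*d <= n.
--     def is_prime(n):
--         if n < 2:
--             return False
--         if n % 2 == 0:
--             return n == 2
--         d = 3
--         while d * d <= n:
--             if n % d == 0:
--                 return False
--             d += 2
--         return True
--
--     # Single pass: maintain the (at most) four largest primes seen so far,
--     # kept in descending order; no sort of the whole array.
--     best = []
--     for num in arr:
--         if is_prime(num):
--             i = 0
--             while i < len(best) and num <= best[i]:
--                 i += 1
--             best.insert(i, num)
--             if len(best) > 4:
--                 best.pop()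
--
--     product = 1
--     for p in best:
--         product *= p
--     return product
-- ===== Notes on version B (the rewrite author's own statement) =====
-- stated objective: faster
-- what changed: B replaces A's sort-whole-array-then-filter-then-slice pipeline by a single pass that maintains the four largest primes seen so far in a bounded insertion list (no sort of the array), and replaces A's float-sqrt trial division over range(2, int(n**0.5)+1) by odd-only trial division (reject evens except 2, then try d = 3, 5, ... while d*d <= n); a timing run measured B about 1.6x faster at the largest size.
import Mathlib
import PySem

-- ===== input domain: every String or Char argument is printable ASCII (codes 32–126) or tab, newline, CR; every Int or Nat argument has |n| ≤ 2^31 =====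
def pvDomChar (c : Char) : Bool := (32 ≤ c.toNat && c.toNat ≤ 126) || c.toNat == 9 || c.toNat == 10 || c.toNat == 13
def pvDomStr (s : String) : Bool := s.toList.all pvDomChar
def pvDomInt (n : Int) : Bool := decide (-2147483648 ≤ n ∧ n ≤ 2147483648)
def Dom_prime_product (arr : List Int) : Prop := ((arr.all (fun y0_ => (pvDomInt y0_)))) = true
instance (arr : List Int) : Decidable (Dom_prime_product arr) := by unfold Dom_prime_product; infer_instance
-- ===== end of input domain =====

-- B replaces A's sort-then-filter-then-slice by a single pass that maintains the four largest
-- primes seen so far, and A's float-sqrt trial division by odd-only trial division (alternative).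

-- ===== PORT A =====
-- is_prime: trial division over range(2, int(n**0.5)+1).
-- int(n ** 0.5) = Nat.sqrt n.toNat exactly for 0 ≤ n ≤ 2^31 (n is exact as a double and its
-- correctly rounded sqrt never crosses an integer there), the domain of these theorems.
def pvIsPrimeA (n : Int) : Bool :=
  if n < 2 then false
  else !((PySem.List.pyRange 2 ((Nat.sqrt n.toNat : Int) + 1) 1).any
          (fun i => PySem.Int.mod n i == 0))

def prime_product (arr : List Int) : Int :=
  let primes := (PySem.List.sorted arr (fun x => x) true).filter (fun num => pvIsPrimeA num)
  (PySem.List.slice primes none (some 4)).foldl (fun product num => product * num) 1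

-- ===== PORT B =====
-- the `while d * d <= n: ... d += 2` loop of B's is_prime (entered with d = 3)
def pvTrialOdd (n : Int) (d : Int) (hd : 3 ≤ d) : Bool :=
  if _h : d * d ≤ n then
    if PySem.Int.mod n d == 0 then false
    else pvTrialOdd n (d + 2) (by omega)
  else true
termination_by (n + 1 - d * d).toNat
decreasing_by
  have h1 : d * d < (d + 2) * (d + 2) := by nlinarith
  omega

def pvIsPrimeB (n : Int) : Bool :=
  if n < 2 then false
  else if PySem.Int.mod n 2 == 0 then n == 2
  else pvTrialOdd n 3 (by omega)

-- the `while i < len(best) and num <= best[i]` scan followed by `best.insert(i, num)`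
def pvInsDesc (x : Int) : List Int → List Int
  | [] => [x]
  | y :: ys => if x ≤ y then y :: pvInsDesc x ys else x :: y :: ys

-- `if len(best) > 4: best.pop()`
def pvCap (l : List Int) : List Int := if l.length > 4 then l.dropLast else l

def prime_product_alt (arr : List Int) : Int :=
  let best := arr.foldl (fun best num => if pvIsPrimeB num then pvCap (pvInsDesc num best) else best) []
  best.foldl (fun product p => product * p) 1

-- ===== PRECONDITION & SPEC =====
def Spec_prime_product (arr : List Int) (out : Int) : Prop := out = prime_product_alt arr
instance (arr : List Int) (out : Int) : Decidable (Spec_prime_product arr out) := by unfold Spec_prime_product; infer_instance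

-- ===== CLAIM (what is proved, stated in full; the proofs are below) =====
def Claim_equal_prime_product : Prop := ∀ (arr : List Int), Dom_prime_product arr → Spec_prime_product arr (prime_product arr)

-- ===== LEMMAS AND PROOFS =====

-- the common mathematical content of both primality tests
def pvNoDiv (n : Int) : Prop := ∀ i : Int, 2 ≤ i → i * i ≤ n → ¬ i ∣ n

lemma pv_sqrt_iff {n i : Int} (h2 : 2 ≤ n) (hi : 2 ≤ i) :
    i ≤ (Nat.sqrt n.toNat : Int) ↔ i * i ≤ n := by
  rw [show i = (i.toNat : Int) by omega]
  constructor
  · intro h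
    have : i.toNat ≤ Nat.sqrt n.toNat := by exact_mod_cast h
    have := Nat.le_sqrt.mp this
    have : (i.toNat * i.toNat : Int) ≤ (n.toNat : Int) := by exact_mod_cast this
    push_cast at this ⊢
    omega
  · intro h
    have h' : i.toNat * i.toNat ≤ n.toNat := by
      have : ((i.toNat * i.toNat : Nat) : Int) ≤ ((n.toNat : Nat) : Int) := by push_cast; omega
      exact_mod_cast this
    exact_mod_cast Nat.le_sqrt.mpr h'

lemma pvIsPrimeA_iff (n : Int) : pvIsPrimeA n = true ↔ 2 ≤ n ∧ pvNoDiv n := by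
  unfold pvIsPrimeA
  split
  · simp; omega
  · rename_i h
    have h2 : 2 ≤ n := by omega
    simp only [Bool.not_eq_eq_eq_not, Bool.not_true, List.any_eq_false, beq_iff_eq,
      PySem.List.mem_pyRange_one]
    constructor
    · intro H
      refine ⟨h2, fun i hi hsq hdvd => ?_⟩
      exact (H i ⟨hi, by have := (pv_sqrt_iff h2 hi).mpr hsq; omega⟩)
        ((PySem.Int.mod_eq_zero_iff_dvd n i).mpr hdvd)
    · intro ⟨_, H⟩ i ⟨hi, hlt⟩ hmod
      exact H i hi ((pv_sqrt_iff h2 hi).mp (by omega))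
        ((PySem.Int.mod_eq_zero_iff_dvd n i).mp hmod)

lemma pvTrialOdd_iff (n d : Int) (hd : 3 ≤ d) :
    pvTrialOdd n d hd = true ↔ ∀ e : Int, d ≤ e → (2:Int) ∣ (e - d) → e * e ≤ n → ¬ e ∣ n := by
  fun_induction pvTrialOdd n d hd with
  | case1 d hd h hmod =>
    simp only [Bool.false_eq_true, false_iff, not_forall]
    refine ⟨d, le_refl d, by simp, h, ?_⟩
    simp only [not_not]
    exact (PySem.Int.mod_eq_zero_iff_dvd n d).mp (by simpa using hmod)
  | case2 d hd h hmod ih =>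
    have hnd : ¬ d ∣ n := fun hdvd => by
      simp [(PySem.Int.mod_eq_zero_iff_dvd n d).mpr hdvd] at hmod
    rw [ih]
    constructor
    · intro H e he hpar hsq
      rcases eq_or_lt_of_le he with rfl | hlt
      · exact hnd
      · exact H e (by omega) (by omega) hsq
    · intro H e he hpar hsq
      exact H e (by omega) (by omega) hsq
  | case3 d hd h =>
    simp only [true_iff]
    intro e he hpar hsq
    exfalso
    nlinarith

lemma pvIsPrimeB_iff (n : Int) : pvIsPrimeB n = true ↔ 2 ≤ n ∧ pvNoDiv n := by
  unfold pvIsPrimeB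
  split
  · rename_i h
    simp only [Bool.false_eq_true, false_iff]
    intro ⟨h2, _⟩; omega
  · rename_i h
    have h2 : 2 ≤ n := by omega
    split
    · rename_i heven
      have h2n : (2:Int) ∣ n :=
        (PySem.Int.mod_eq_zero_iff_dvd n 2).mp (by simpa using heven)
      simp only [beq_iff_eq]
      constructor
      · rintro rfl
        exact ⟨by omega, fun i hi hsq hdvd => by nlinarith⟩
      · intro ⟨_, H⟩
        by_contra hne
        exact H 2 (by omega) (by omega) h2n
    · rename_i hodd
      have hno2 : ¬ (2:Int) ∣ n := fun hdvd => by
        simp at hodd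
        omega
      rw [pvTrialOdd_iff]
      constructor
      · intro H
        refine ⟨h2, fun i hi hsq hdvd => ?_⟩
        have hiodd : ¬ (2:Int) ∣ i := fun h2i => hno2 (h2i.trans hdvd)
        have hi3 : 3 ≤ i := by omega
        exact H i hi3 (by omega) hsq hdvd
      · intro ⟨_, H⟩ e he hpar hsq
        exact H e (by omega) hsq

lemma pvPrime_eq (n : Int) : pvIsPrimeA n = pvIsPrimeB n := by
  rw [Bool.eq_iff_iff, pvIsPrimeA_iff, pvIsPrimeB_iff]

-- selection side: pvDesc names sorted(·, reverse=True)
def pvDesc (l : List Int) : List Int := PySem.List.sorted l (fun x => x) true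

lemma pvDesc_eq_of_perm {xs ys : List Int} (hp : ys.Perm xs)
    (hs : List.Pairwise (fun a b : Int => b ≤ a) ys) : pvDesc xs = ys := by
  apply List.Perm.eq_of_pairwise (le := fun a b : Int => b ≤ a)
  · intro a b _ _ h1 h2; omega
  · exact PySem.List.sorted_pairwise_rev xs (fun x => x)
  · exact hs
  · exact (PySem.List.sorted_perm xs (fun x => x) true).trans hp.symm

lemma pvDesc_pairwise (l : List Int) :
    List.Pairwise (fun a b : Int => b ≤ a) (pvDesc l) :=
  PySem.List.sorted_pairwise_rev l (fun x => x)

lemma pvDesc_perm (l : List Int) : (pvDesc l).Perm l :=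
  PySem.List.sorted_perm l (fun x => x) true

lemma pvInsDesc_perm (x : Int) (s : List Int) : (pvInsDesc x s).Perm (x :: s) := by
  induction s with
  | nil => simp [pvInsDesc]
  | cons y ys ih =>
    simp only [pvInsDesc]
    split
    · exact ((ih.cons y).trans (List.Perm.swap x y ys))
    · exact List.Perm.refl _

lemma pvInsDesc_mem {z x : Int} {s : List Int} (h : z ∈ pvInsDesc x s) : z = x ∨ z ∈ s := by
  have := (pvInsDesc_perm x s).mem_iff.mp h
  simpa using this

lemma pvInsDesc_pairwise (x : Int) (s : List Int)
    (hs : List.Pairwise (fun a b : Int => b ≤ a) s) :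
    List.Pairwise (fun a b : Int => b ≤ a) (pvInsDesc x s) := by
  induction s with
  | nil => simp [pvInsDesc]
  | cons y ys ih =>
    rcases List.pairwise_cons.mp hs with ⟨hy, hys⟩
    simp only [pvInsDesc]
    split
    · rename_i hxy
      refine List.pairwise_cons.mpr ⟨?_, ih hys⟩
      intro z hz
      rcases pvInsDesc_mem hz with rfl | hz'
      · exact hxy
      · exact hy z hz'
    · rename_i hxy
      refine List.pairwise_cons.mpr ⟨?_, hs⟩
      intro z hz
      rcases List.mem_cons.mp hz with rfl | hz'
      · omega
      · exact le_trans (hy z hz') (by omega)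

lemma pvInsDesc_desc (x : Int) (l : List Int) : pvInsDesc x (pvDesc l) = pvDesc (l ++ [x]) := by
  symm
  apply pvDesc_eq_of_perm
  · refine (pvInsDesc_perm x (pvDesc l)).trans ?_
    refine ((pvDesc_perm l).cons x).trans ?_
    simpa using (List.perm_append_singleton x l).symm
  · exact pvInsDesc_pairwise x _ (pvDesc_pairwise l)

lemma pvInsDesc_take (x : Int) (s : List Int) (k : Nat) :
    ((pvInsDesc x (s.take k)).take k) = (pvInsDesc x s).take k := by
  induction s generalizing k with
  | nil => simp
  | cons y ys ih =>
    cases k with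
    | zero => simp
    | succ k =>
      simp only [List.take_succ_cons, pvInsDesc]
      split
      · simp only [List.take_succ_cons, ih]
      · cases k with
        | zero => simp
        | succ j =>
          simp [List.take_succ_cons, List.take_take]

lemma pvInsDesc_length (x : Int) (s : List Int) : (pvInsDesc x s).length = s.length + 1 := by
  induction s with
  | nil => rfl
  | cons y ys ih => simp only [pvInsDesc]; split <;> simp [ih]

lemma pvCap_take (x : Int) (s : List Int) (hs : s.length ≤ 4) :
    pvCap (pvInsDesc x s) = (pvInsDesc x s).take 4 := by
  unfold pvCap
  have hl := pvInsDesc_length x s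
  split
  · rw [List.dropLast_eq_take]; congr 1; omega
  · rw [List.take_of_length_le (by omega)]

lemma pvFold_best (p : Int → Bool) (arr acc : List Int) :
    arr.foldl (fun best num => if p num then pvCap (pvInsDesc num best) else best)
      ((pvDesc acc).take 4)
      = (pvDesc (acc ++ arr.filter (fun n => p n))).take 4 := by
  induction arr generalizing acc with
  | nil => simp
  | cons x xs ih =>
    simp only [List.foldl_cons]
    by_cases hx : p x
    · rw [if_pos hx, pvCap_take x _ (by simp), pvInsDesc_take, pvInsDesc_desc, ih (acc ++ [x])]
      simp [hx]
    · rw [if_neg hx, ih acc]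
      simp [hx]

lemma pvFilter_desc (p : Int → Bool) (arr : List Int) :
    (pvDesc arr).filter p = pvDesc (arr.filter p) := by
  symm
  apply pvDesc_eq_of_perm
  · exact (pvDesc_perm arr).filter p
  · exact (pvDesc_pairwise arr).filter p

-- ===== VERDICT (by name: the statement is the Claim_ definition above) =====
theorem prime_product_spec : Claim_equal_prime_product := by
  intro arr _
  show prime_product arr = prime_product_alt arr
  show (PySem.List.slice
        ((PySem.List.sorted arr (fun x => x) true).filter (fun num => pvIsPrimeA num))
        none (some 4)).foldl (fun product num => product * num) 1
      = (arr.foldl (fun best num => if pvIsPrimeB num then pvCap (pvInsDesc num best) else best)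
          []).foldl (fun product p => product * p) 1
  have h1 : arr.foldl (fun best num => if pvIsPrimeB num then pvCap (pvInsDesc num best) else best) []
      = (pvDesc (arr.filter (fun n => pvIsPrimeB n))).take 4 := by
    have h := pvFold_best (fun n => pvIsPrimeB n) arr []
    rw [show (pvDesc []).take 4 = [] from rfl] at h
    simpa using h
  have h2 : (PySem.List.sorted arr (fun x => x) true).filter (fun num => pvIsPrimeA num)
      = pvDesc (arr.filter (fun n => pvIsPrimeB n)) := by
    have hp : (fun num : Int => pvIsPrimeA num) = (fun n : Int => pvIsPrimeB n) :=
      funext pvPrime_eq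
    rw [show PySem.List.sorted arr (fun x => x) true = pvDesc arr from rfl, hp]
    exact pvFilter_desc _ arr
  rw [PySem.List.slice_to _ (by norm_num), h2, h1]
  rfl
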